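-- pv_equiv track=rewrite | github.com/wakaHazel/lawai-penguin-court | scripts/generate_penguin_yuanqi_package.py | build_shared_strings
-- ===== SOURCE A (Python) =====
-- def build_shared_strings(rows: list[list[str]]) -> tuple[list[str], dict[str, int]]:
--     shared: list[str] = []
--     index_map: dict[str, int] = {}
--     for row in rows:
--         for cell in row:
--             if cell not in index_map:
--                 index_map[cell] = len(shared)
--                 shared.append(cell)
--     return shared, index_map
-- ===== SOURCE B (Python) =====
-- def build_shared_strings(rows: list[list[str]]) -> tuple[list[str], dict[str, int]]:
--     shared: list[str] = []
--     pending = [cell for row in rows for cell in row]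
--     while pending:
--         head = pending[0]
--         shared.append(head)
--         pending = [c for c in pending if c != head]
--     index_map = {c: i for i, c in enumerate(shared)}
--     return shared, index_map
-- ===== Notes on version B (the rewrite author's own statement) =====
-- stated objective: alternative
-- what changed: Replaces A's interleaved dict-membership-check-and-append loop with an iterative filter-out-duplicates worklist: flatten the cells once, then repeatedly take the head of the pending list as the next unique cell and filter every occurrence of it out of the worklist (no membership structure during dedup); the index map is built afterwards by an enumerate comprehension over the finished shared list.
import Mathlib
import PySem

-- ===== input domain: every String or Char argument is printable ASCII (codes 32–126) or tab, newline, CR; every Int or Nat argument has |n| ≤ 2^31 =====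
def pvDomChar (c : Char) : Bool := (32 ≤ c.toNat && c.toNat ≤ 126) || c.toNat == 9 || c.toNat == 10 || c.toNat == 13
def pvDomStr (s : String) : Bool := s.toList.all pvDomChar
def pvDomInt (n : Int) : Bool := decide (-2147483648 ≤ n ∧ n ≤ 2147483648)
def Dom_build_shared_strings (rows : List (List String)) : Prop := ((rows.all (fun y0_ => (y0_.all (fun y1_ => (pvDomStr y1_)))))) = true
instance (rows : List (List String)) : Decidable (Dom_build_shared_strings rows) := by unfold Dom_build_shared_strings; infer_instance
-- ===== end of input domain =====

-- B replaces A's interleaved dict-membership dedup loop by an iterative filter-out-duplicates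
-- worklist over the flattened cells (no membership structure), then builds the index map afterwards
-- by an enumerate comprehension (alternative algorithm, not claimed faster).


-- ===== PORT A =====
-- the nested loop: state = (shared, index_map); if cell not in index_map: assign index, append
def pvLoopA (rows : List (List String)) : List String × PySem.Dict String Int :=
  rows.foldl (fun st row =>
    row.foldl (fun st cell =>
      if st.2.contains cell then st
      else (st.1 ++ [cell], st.2.insert cell (st.1.length : Int))) st)
    ([], PySem.Dict.empty)
def build_shared_strings (rows : List (List String)) : List String × (List (String × Int)) :=
  ((pvLoopA rows).1, (pvLoopA rows).2.items)

-- ===== PORT B =====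
-- the while loop: take the head of pending as the next unique cell, filter out its occurrences
def pvUniqB (pending : List String) : List String :=
  match pending with
  | [] => []
  | head :: t => head :: pvUniqB ((head :: t).filter (fun c => !(c == head)))
termination_by pending.length
decreasing_by
  simp only [List.filter_cons, beq_self_eq_true, Bool.not_true, List.length_cons]
  exact Nat.lt_succ_of_le (List.length_filter_le _ _)
-- index_map = {c: i for i, c in enumerate(shared)}
def pvIndexB (shared : List String) : PySem.Dict String Int :=
  (PySem.List.enumerate shared 0).foldl (fun d p => d.insert p.2 p.1) PySem.Dict.empty
def build_shared_strings_alt (rows : List (List String)) : List String × (List (String × Int)) :=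
  (pvUniqB (rows.flatMap id), (pvIndexB (pvUniqB (rows.flatMap id))).items)

-- ===== PRECONDITION & SPEC =====
def Spec_build_shared_strings (rows : List (List String)) (out : List String × (List (String × Int))) : Prop := out = build_shared_strings_alt rows
instance (rows : List (List String)) (out : List String × (List (String × Int))) : Decidable (Spec_build_shared_strings rows out) := by unfold Spec_build_shared_strings; infer_instance

-- ===== CLAIM (what is proved, stated in full; the proofs are below) =====
def Claim_equal_build_shared_strings : Prop := ∀ (rows : List (List String)), Dom_build_shared_strings rows → Spec_build_shared_strings rows (build_shared_strings rows)

-- ===== LEMMAS AND PROOFS =====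

-- index map of a shared list: cell ↦ its position
def pvMapOf (sh : List String) : List (String × Int) :=
  (PySem.List.enumerate sh 0).map (fun p => (p.2, p.1))

lemma pvMapOf_keys (sh : List String) : (pvMapOf sh).map Prod.fst = sh := by
  simp [pvMapOf, List.map_map, Function.comp_def]

lemma pvMapOf_append_singleton (sh : List String) (c : String) :
    pvMapOf (sh ++ [c]) = pvMapOf sh ++ [(c, (sh.length : Int))] := by
  simp [pvMapOf, PySem.List.enumerate_append]

lemma pvContains_mapOf (sh : List String) (c : String) :
    (PySem.Dict.mk (pvMapOf sh)).contains c = sh.contains c := by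
  rw [PySem.Dict.contains_eq_decide_mem_keys]
  have hk : (PySem.Dict.mk (pvMapOf sh)).keys = sh := by
    simpa [PySem.Dict.keys] using pvMapOf_keys sh
  rw [hk]
  simp

-- loop invariant for A's fold over the flattened cells
lemma pvLoop (l sh : List String) (h : sh.Nodup) :
    l.foldl (fun (st : List String × PySem.Dict String Int) cell =>
        if st.2.contains cell then st
        else (st.1 ++ [cell], st.2.insert cell (st.1.length : Int)))
      (sh, PySem.Dict.mk (pvMapOf sh)) =
    (PySem.Set.update sh l, PySem.Dict.mk (pvMapOf (PySem.Set.update sh l))) := by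
  induction l generalizing sh with
  | nil => simp [PySem.Set.update]
  | cons c l ih =>
    rw [List.foldl_cons, PySem.Set.update_cons]
    by_cases hc : c ∈ sh
    · rw [if_pos (by rw [pvContains_mapOf]; simpa using hc),
        PySem.Set.add_of_mem hc]
      exact ih sh h
    · rw [if_neg (by rw [pvContains_mapOf]; simpa using hc),
        PySem.Set.add_of_not_mem hc]
      have hcon : (PySem.Dict.mk (pvMapOf sh)).contains c = false := by
        rw [pvContains_mapOf]; simpa using hc
      have hins : (PySem.Dict.mk (pvMapOf sh)).insert c (sh.length : Int)
          = PySem.Dict.mk (pvMapOf (sh ++ [c])) := by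
        apply PySem.Dict.ext
        rw [PySem.Dict.items_insert, hcon]
        simp [pvMapOf_append_singleton]
      have hnd : (sh ++ [c]).Nodup := by
        simp [List.nodup_append, h]
        intro a ha he
        exact hc (he ▸ ha)
      simpa [hins] using ih (sh ++ [c]) hnd

-- double fold over rows = fold over the flattened cells
lemma pvFlat (rows : List (List String)) (f : (List String × PySem.Dict String Int) → String → (List String × PySem.Dict String Int)) (init : List String × PySem.Dict String Int) :
    rows.foldl (fun st row => row.foldl f st) init = (rows.flatMap id).foldl f init := by
  induction rows generalizing init with
  | nil => simp
  | cons r rs ih => simp [List.foldl_append, ih]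

-- A's seen-set accumulation = seen prefix ++ B's filter-based dedup of the not-yet-seen cells
lemma pvUpdate_eq_uniq_filter (t s : List String) :
    PySem.Set.update s t = s ++ pvUniqB (t.filter (fun c => !(s.contains c))) := by
  induction t generalizing s with
  | nil => simp [PySem.Set.update, pvUniqB]
  | cons h t ih =>
    rw [PySem.Set.update_cons]
    by_cases hmem : h ∈ s
    · rw [PySem.Set.add_of_mem hmem]
      have hskip : (h :: t).filter (fun c => !(s.contains c))
          = t.filter (fun c => !(s.contains c)) := by
        simp [hmem]
      rw [hskip]
      exact ih s
    · rw [PySem.Set.add_of_not_mem hmem]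
      have h1 : (h :: t).filter (fun c => !(s.contains c))
          = h :: t.filter (fun c => !(s.contains c)) := by
        simp [hmem]
      have hfil : t.filter (fun c => !((s ++ [h]).contains c))
          = (t.filter (fun c => !(s.contains c))).filter (fun c => !(c == h)) := by
        rw [List.filter_filter]
        apply List.filter_congr
        intro c _
        by_cases hc : c = h
        · subst hc; simp [List.contains_eq_mem]
        · by_cases hcs : c ∈ s <;>
            simp [List.contains_eq_mem, hcs, hc]
      have hstep : pvUniqB (h :: t.filter (fun c => !(s.contains c)))
          = h :: pvUniqB ((t.filter (fun c => !(s.contains c))).filter (fun c => !(c == h))) := by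
        rw [pvUniqB]
        congr 2
        simp
      rw [ih (s ++ [h]), hfil, h1, hstep]
      simp

-- hence B's worklist dedup is exactly Python's first-occurrence dedup
lemma pvUniqB_eq_dedup (l : List String) : pvUniqB l = PySem.List.dedup l := by
  have h := pvUpdate_eq_uniq_filter l []
  simp only [List.contains_eq_mem, List.not_mem_nil, decide_false, Bool.not_false,
    List.filter_true, List.nil_append] at h
  rw [← h, PySem.Set.update_nil_left]
  simp

lemma pvUniqB_nodup (l : List String) : (pvUniqB l).Nodup := by
  rw [pvUniqB_eq_dedup]; exact PySem.List.nodup_dedup l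

-- B's dict-comprehension items are exactly pvMapOf shared (fresh distinct keys append in order)
lemma pvAltItems (sh : List String) (h : sh.Nodup) :
    ((PySem.List.enumerate sh 0).foldl (fun d p => d.insert p.2 p.1) PySem.Dict.empty).items
      = pvMapOf sh := by
  have := PySem.Dict.items_foldl_insert_fresh (l := PySem.List.enumerate sh 0)
      (k := fun p => p.2) (v := fun p => p.1) (d := PySem.Dict.empty)
      (by intro a _; rfl)
      (by rw [show (fun (p : Int × String) => p.2) = (·.2) from rfl, PySem.List.map_snd_enumerate]; exact h)
  simpa [pvMapOf] using this

-- ===== VERDICT (by name: the statement is the Claim_ definition above) =====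
theorem build_shared_strings_spec : Claim_equal_build_shared_strings := by
  intro rows _
  unfold Spec_build_shared_strings build_shared_strings build_shared_strings_alt
  have hsh : PySem.Set.update [] (rows.flatMap id) = pvUniqB (rows.flatMap id) := by
    rw [PySem.Set.update_nil_left, ← PySem.List.dedup_eq_ofList]
    exact (pvUniqB_eq_dedup _).symm
  have hA : pvLoopA rows = (pvUniqB (rows.flatMap id), PySem.Dict.mk (pvMapOf (pvUniqB (rows.flatMap id)))) := by
    unfold pvLoopA
    rw [pvFlat, show (([], PySem.Dict.empty) : List String × PySem.Dict String Int)
        = ([], PySem.Dict.mk (pvMapOf [])) from rfl,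
      pvLoop _ [] List.nodup_nil, hsh]
  have hB : (pvIndexB (pvUniqB (rows.flatMap id))).items = pvMapOf (pvUniqB (rows.flatMap id)) := by
    unfold pvIndexB
    exact pvAltItems _ (pvUniqB_nodup _)
  rw [hA, hB]
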